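-- pv_equiv track=rewrite | github.com/johnsonwangzs/Crypto | DigitalSignature/SHA1.py | f
-- ===== SOURCE A (Python) =====
-- def int2list(aInt, n):
--     """
--     将一个整型转为列表，存储其二进制比特位
--     :param aInt: 整型数
--     :param n: 二进制数的比特位数
--     :return: 列表存储的二进制数
--     """
--     listValue = []
--     for i in range(n):
--         listValue.append((aInt >> (n - 1 - i)) & 0b1)
--     return listValue
--
-- def list2int(aList, n):
--     """
--     将一个用列表存储的二进制数转为整型
--     :param aList: 列表存储的二进制数
--     :param n: 二进制数的比特位数
--     :return: 整型的二进制数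
--     """
--     intValue = 0
--     for i in range(n):
--         intValue = (intValue << 1) + aList[i]
--     return intValue
--
-- def f(t, b, c, d):
--     """
--     逻辑函数f
--     :param t: 不同的步数对应不同的f
--     :param b: 链接变量B
--     :param c: 链接变量C
--     :param d: 链接变量D
--     :return: f函数结果
--     """
--     tmp_b = int2list(b, 32)
--     tmp_c = int2list(c, 32)
--     tmp_d = int2list(d, 32)
--     res = []
--     if t == 0:
--         for i in range(32):
--             res.append((tmp_b[i] & tmp_c[i]) | ((tmp_b[i] ^ 0b1) & tmp_d[i]))
--     elif t == 1:
--         for i in range(32):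
--             res.append((tmp_b[i] ^ tmp_c[i] ^ tmp_d[i]))
--     elif t == 2:
--         for i in range(32):
--             res.append((tmp_b[i] & tmp_c[i]) | (tmp_b[i] & tmp_d[i]) | (tmp_c[i] & tmp_d[i]))
--     elif t == 3:
--         for i in range(32):
--             res.append((tmp_b[i] ^ tmp_c[i] ^ tmp_d[i]))
--     return list2int(res, 32)
-- ===== SOURCE B (Python) =====
-- MASK32 = 0xFFFFFFFF
--
-- def f(t, b, c, d):
--     b &= MASK32
--     c &= MASK32
--     d &= MASK32
--     if t == 0:
--         return (b & c) | (~b & MASK32 & d)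
--     if t == 1 or t == 3:
--         return b ^ c ^ d
--     if t == 2:
--         return (b & c) | (b & d) | (c & d)
--     raise IndexError("t must be one of 0, 1, 2, 3")
-- ===== Notes on version B (the rewrite author's own statement) =====
-- stated objective: simpler
-- what changed: B drops A's int2list/list2int per-bit list machinery and computes each SHA-1 round function in one whole-word bitwise formula on 32-bit-masked integers.
import Mathlib
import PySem

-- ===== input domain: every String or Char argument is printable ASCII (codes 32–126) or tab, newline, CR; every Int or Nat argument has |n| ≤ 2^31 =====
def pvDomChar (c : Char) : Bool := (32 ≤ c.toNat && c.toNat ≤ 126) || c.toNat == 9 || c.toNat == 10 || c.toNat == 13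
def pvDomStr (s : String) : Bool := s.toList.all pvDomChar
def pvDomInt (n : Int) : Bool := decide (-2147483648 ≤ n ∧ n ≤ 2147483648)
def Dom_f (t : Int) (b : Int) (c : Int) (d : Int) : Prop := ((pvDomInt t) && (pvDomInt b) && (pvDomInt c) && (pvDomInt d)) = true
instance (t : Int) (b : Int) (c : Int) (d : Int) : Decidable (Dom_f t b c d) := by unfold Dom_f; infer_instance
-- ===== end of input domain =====

-- B computes the SHA-1 round function directly on whole 32-bit words (mask, then one
-- bitwise formula per round family) instead of A's per-bit list machinery; objective: simpler.

-- ===== PORT A =====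

-- int2list(aInt, n): big-endian list of the low n two's-complement bits
def int2list (aInt : Int) (n : Int) : List Int :=
  (PySem.List.pyRange 0 n).foldl
    (fun listValue i => listValue ++ [Int.land (aInt >>> (n - 1 - i)) 1]) []

-- list2int(aList, n): aList[i] raises IndexError when out of range (reached only for
-- t ∉ {0,1,2,3}, where res = []); those inputs are excluded by Pre_f, so pyGetD's default is never used
def list2int (aList : List Int) (n : Int) : Int :=
  (PySem.List.pyRange 0 n).foldl
    (fun intValue i => (intValue <<< (1 : Int)) + PySem.List.pyGetD aList i 0) 0

def f (t : Int) (b : Int) (c : Int) (d : Int) : Int :=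
  let tmp_b := int2list b 32
  let tmp_c := int2list c 32
  let tmp_d := int2list d 32
  let res : List Int :=
    if t = 0 then
      (PySem.List.pyRange 0 32).foldl (fun res i =>
        res ++ [Int.lor
          (Int.land (PySem.List.pyGetD tmp_b i 0) (PySem.List.pyGetD tmp_c i 0))
          (Int.land (Int.xor (PySem.List.pyGetD tmp_b i 0) 1) (PySem.List.pyGetD tmp_d i 0))]) []
    else if t = 1 then
      (PySem.List.pyRange 0 32).foldl (fun res i =>
        res ++ [Int.xor (Int.xor (PySem.List.pyGetD tmp_b i 0) (PySem.List.pyGetD tmp_c i 0))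
          (PySem.List.pyGetD tmp_d i 0)]) []
    else if t = 2 then
      (PySem.List.pyRange 0 32).foldl (fun res i =>
        res ++ [Int.lor (Int.lor
          (Int.land (PySem.List.pyGetD tmp_b i 0) (PySem.List.pyGetD tmp_c i 0))
          (Int.land (PySem.List.pyGetD tmp_b i 0) (PySem.List.pyGetD tmp_d i 0)))
          (Int.land (PySem.List.pyGetD tmp_c i 0) (PySem.List.pyGetD tmp_d i 0))]) []
    else if t = 3 then
      (PySem.List.pyRange 0 32).foldl (fun res i =>
        res ++ [Int.xor (Int.xor (PySem.List.pyGetD tmp_b i 0) (PySem.List.pyGetD tmp_c i 0))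
          (PySem.List.pyGetD tmp_d i 0)]) []
    else []
  list2int res 32

-- ===== PORT B =====

def f_alt (t : Int) (b : Int) (c : Int) (d : Int) : Int :=
  let b := Int.land b 4294967295
  let c := Int.land c 4294967295
  let d := Int.land d 4294967295
  if t = 0 then Int.lor (Int.land b c) (Int.land (Int.land (Int.lnot b) 4294967295) d)
  else if t = 1 ∨ t = 3 then Int.xor (Int.xor b c) d
  else if t = 2 then Int.lor (Int.lor (Int.land b c) (Int.land b d)) (Int.land c d)
  else 0  -- Source B raises IndexError here; unreachable under Pre_f

-- ===== PRECONDITION & SPEC =====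
-- Pre_f excludes t ∉ {0,1,2,3}, on which the Python A raises IndexError
-- (res stays empty and list2int indexes the empty list); B raises there too.
def Pre_f (t : Int) (b : Int) (c : Int) (d : Int) : Prop := t = 0 ∨ t = 1 ∨ t = 2 ∨ t = 3
instance (t : Int) (b : Int) (c : Int) (d : Int) : Decidable (Pre_f t b c d) := by unfold Pre_f; infer_instance
def pvWitness_f : Int × Int × Int × Int := (0, 1, 2, 3)

def Spec_f (t : Int) (b : Int) (c : Int) (d : Int) (out : Int) : Prop := out = f_alt t b c d
instance (t : Int) (b : Int) (c : Int) (d : Int) (out : Int) : Decidable (Spec_f t b c d out) := by unfold Spec_f; infer_instance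

-- ===== CLAIM (what is proved, stated in full; the proofs are below) =====
def Claim_equal_f : Prop := ∀ (t : Int) (b : Int) (c : Int) (d : Int), Dom_f t b c d → Pre_f t b c d → Spec_f t b c d (f t b c d)

-- ===== LEMMAS AND PROOFS =====

-- Python `x << 1` on ints
theorem int_shiftLeft_one (a : Int) : a <<< (1 : Int) = 2 * a := by
  rcases a with m | m
  · show ((m <<< 1 : Nat) : Int) = 2 * m
    push_cast [Nat.shiftLeft_eq]
    ring
  · rfl

theorem nat_testBit_one_succ (i : Nat) : Nat.testBit 1 (i + 1) = false := by
  simp [Nat.testBit_succ]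

theorem nat_ldiff_one (m : Nat) : Nat.ldiff 1 m = if m.testBit 0 then 0 else 1 := by
  apply Nat.eq_of_testBit_eq
  intro i
  rw [Nat.testBit_ldiff]
  cases i with
  | zero => cases m.testBit 0 <;> simp
  | succ i =>
      rw [nat_testBit_one_succ]
      cases m.testBit 0 <;> simp [nat_testBit_one_succ]

theorem int_land_one (y : Int) : Int.land y 1 = cond (y.testBit 0) 1 0 := by
  rcases y with m | m
  · show ((m &&& 1 : Nat) : Int) = cond (m.testBit 0) 1 0
    rw [Nat.and_one_is_mod]
    rcases Nat.mod_two_eq_zero_or_one m with h | h <;>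
      simp [Nat.testBit_zero, h]
  · show ((Nat.ldiff 1 m : Nat) : Int) = cond (!m.testBit 0) 1 0
    rw [nat_ldiff_one]
    cases m.testBit 0 <;> simp

theorem int_testBit_shiftRight_zero (x : Int) (j : Nat) :
    (x >>> ((j : Nat) : Int)).testBit 0 = x.testBit j := by
  rcases x with m | m
  · rw [Int.ofNat_eq_natCast, Int.shiftRight_natCast]
    show (m >>> j).testBit 0 = m.testBit j
    rw [Nat.testBit_shiftRight, Nat.add_zero]
  · rw [Int.shiftRight_negSucc]
    show (!(m >>> j).testBit 0) = (!m.testBit j)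
    rw [Nat.testBit_shiftRight, Nat.add_zero]

-- bit j of x, as Python's `(x >> j) & 1`
theorem int_bit_extract (x : Int) (j : Nat) :
    Int.land (x >>> ((j : Nat) : Int)) 1 = cond (x.testBit j) 1 0 := by
  rw [int_land_one, int_testBit_shiftRight_zero]

-- int2list x 32 is the big-endian list of cond-bits
theorem int2list_eq (x : Int) :
    int2list x 32 = (List.range 32).map (fun k => (cond (x.testBit (31 - k)) 1 0 : Int)) := by
  unfold int2list
  rw [show (32 : Int) = ((32 : Nat) : Int) from rfl, PySem.List.pyRange_zero_natCast,
    List.foldl_map, PySem.List.foldl_append_singleton_eq_map, List.nil_append]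
  apply List.map_congr_left
  intro k hk
  have hk32 : k < 32 := List.mem_range.mp hk
  have harg : ((32 : Nat) : Int) - 1 - (k : Int) = ((31 - k : Nat) : Int) := by
    push_cast [Nat.cast_sub (by omega : k ≤ 31)]
    ring
  rw [harg, int_bit_extract]

-- value of the little-endian first n bits of β
def nval (β : Nat → Bool) : Nat → Nat
  | 0 => 0
  | j + 1 => nval β j + (cond (β j) 1 0) * 2 ^ j

theorem nval_lt (β : Nat → Bool) (n : Nat) : nval β n < 2 ^ n := by
  induction n with
  | zero => simp [nval]
  | succ n ih =>
      have : (cond (β n) 1 0 : Nat) ≤ 1 := by cases β n <;> simp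
      calc nval β (n + 1) = nval β n + (cond (β n) 1 0) * 2 ^ n := rfl
        _ < 2 ^ n + (cond (β n) 1 0) * 2 ^ n := by omega
        _ ≤ 2 ^ n + 1 * 2 ^ n := by
              have := Nat.mul_le_mul_right (2 ^ n) this
              omega
        _ = 2 ^ (n + 1) := by ring

theorem nval_testBit (β : Nat → Bool) (n j : Nat) :
    (nval β n).testBit j = (decide (j < n) && β j) := by
  induction n generalizing j with
  | zero => simp [nval]
  | succ n ih =>
      have h : nval β (n + 1) = 2 ^ n * (cond (β n) 1 0) + nval β n := by
        show nval β n + (cond (β n) 1 0) * 2 ^ n = _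
        ring
      rw [h, Nat.testBit_two_pow_mul_add _ (nval_lt β n)]
      by_cases hj : j < n
      · rw [if_pos hj, ih]
        have h1 : decide (j < n) = true := by simpa using hj
        have h2 : decide (j < n + 1) = true := by simp; omega
        rw [h1, h2]
      · rw [if_neg hj]
        rcases Nat.lt_or_ge n j with hlt | hge
        · have h2 : decide (j < n + 1) = false := by simp; omega
          rw [h2]
          obtain ⟨k, hk⟩ : ∃ k, j - n = k + 1 := ⟨j - n - 1, by omega⟩
          rw [hk]
          cases hb : β n <;> simp [nat_testBit_one_succ]
        · have hjn : j = n := by omega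
          rw [hjn, Nat.sub_self]
          cases β n <;> simp [Nat.testBit_zero]

-- fold with a nonzero accumulator
theorem foldl_two_shift (L : List Int) (A : Int) :
    L.foldl (fun a x => 2 * a + x) A
      = A * 2 ^ L.length + L.foldl (fun a x => 2 * a + x) 0 := by
  induction L generalizing A with
  | nil => simp
  | cons x L ih =>
      simp only [List.foldl_cons, List.length_cons]
      rw [ih (2 * A + x), ih (2 * 0 + x)]
      ring

-- the big-endian cond-bit list folds to nval
theorem map_val (β : Nat → Bool) (n : Nat) :
    ((List.range n).map (fun k => (cond (β (n - 1 - k)) 1 0 : Int))).foldl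
        (fun a x => 2 * a + x) 0 = ((nval β n : Nat) : Int) := by
  induction n with
  | zero => simp [nval]
  | succ n ih =>
      rw [List.range_succ_eq_map, List.map_cons, List.map_map]
      have hfun : ((fun k => (cond (β (n + 1 - 1 - k)) 1 0 : Int)) ∘ Nat.succ)
          = fun k => (cond (β (n - 1 - k)) 1 0 : Int) := by
        funext k
        simp only [Function.comp]
        congr 2
        omega
      rw [hfun]
      show ((List.range n).map _).foldl (fun a x => 2 * a + x)
        (2 * 0 + (cond (β (n + 1 - 1 - 0)) 1 0 : Int)) = _
      rw [foldl_two_shift, ih]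
      have hn : n + 1 - 1 - 0 = n := by omega
      rw [hn]
      show (2 * 0 + (cond (β n) 1 0 : Int)) * 2 ^ ((List.range n).map _).length + _ = _
      rw [List.length_map, List.length_range]
      have : nval β (n + 1) = nval β n + (cond (β n) 1 0) * 2 ^ n := rfl
      rw [this]
      cases β n <;> simp <;> ring_nf

-- list2int on a length-32 list is the plain base-2 fold
theorem list2int_val (M : List Int) (hM : M.length = 32) :
    list2int M 32 = M.foldl (fun a x => 2 * a + x) 0 := by
  unfold list2int
  rw [show (32 : Int) = ((M.length : Nat) : Int) by rw [hM]; rfl]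
  rw [PySem.List.foldl_pyRange_zero_pyGetD' M 0 (fun acc x => acc <<< (1 : Int) + x) 0]
  simp only [int_shiftLeft_one]

-- A's whole body, for any elementwise op h matching a Boolean op
theorem buildA (h : Int → Int → Int → Int) (op : Bool → Bool → Bool → Bool)
    (hop : ∀ p q r : Bool, h (cond p 1 0) (cond q 1 0) (cond r 1 0) = cond (op p q r) 1 0)
    (b c d : Int) :
    list2int ((PySem.List.pyRange 0 32).foldl (fun res i =>
        res ++ [h (PySem.List.pyGetD (int2list b 32) i 0)
                  (PySem.List.pyGetD (int2list c 32) i 0)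
                  (PySem.List.pyGetD (int2list d 32) i 0)]) []) 32
      = ((nval (fun j => op (b.testBit j) (c.testBit j) (d.testBit j)) 32 : Nat) : Int) := by
  rw [int2list_eq b, int2list_eq c, int2list_eq d]
  rw [show (32 : Int) = ((32 : Nat) : Int) from rfl, PySem.List.pyRange_zero_natCast,
    List.foldl_map, PySem.List.foldl_append_singleton_eq_map, List.nil_append]
  have hmap : (List.range 32).map (fun (k : Nat) =>
      h (PySem.List.pyGetD ((List.range 32).map (fun k => (cond (b.testBit (31 - k)) 1 0 : Int))) (k : Int) 0)
        (PySem.List.pyGetD ((List.range 32).map (fun k => (cond (c.testBit (31 - k)) 1 0 : Int))) (k : Int) 0)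
        (PySem.List.pyGetD ((List.range 32).map (fun k => (cond (d.testBit (31 - k)) 1 0 : Int))) (k : Int) 0))
      = (List.range 32).map (fun k =>
          (cond (op (b.testBit (31 - k)) (c.testBit (31 - k)) (d.testBit (31 - k))) 1 0 : Int)) := by
    apply List.map_congr_left
    intro k hk
    have hk32 : k < 32 := List.mem_range.mp hk
    rw [PySem.List.pyGetD_natCast, PySem.List.pyGetD_natCast, PySem.List.pyGetD_natCast,
      PySem.List.getD_map_range _ _ _ _ hk32, PySem.List.getD_map_range _ _ _ _ hk32,
      PySem.List.getD_map_range _ _ _ _ hk32, hop]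
  rw [hmap, show ((32 : Nat) : Int) = (32 : Int) from rfl, list2int_val _ (by simp)]
  have := map_val (fun j => op (b.testBit j) (c.testBit j) (d.testBit j)) 32
  simpa using this

-- nonnegativity helpers
theorem int_land_natCast_nonneg (x : Int) (n : Nat) : 0 ≤ Int.land x (n : Int) := by
  rcases x with m | m
  · exact Int.natCast_nonneg _
  · exact Int.natCast_nonneg _

theorem int_lor_nonneg {x y : Int} (hx : 0 ≤ x) (hy : 0 ≤ y) : 0 ≤ Int.lor x y := by
  obtain ⟨m, rfl⟩ := Int.eq_ofNat_of_zero_le hx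
  obtain ⟨n, rfl⟩ := Int.eq_ofNat_of_zero_le hy
  exact Int.natCast_nonneg _

theorem int_xor_nonneg {x y : Int} (hx : 0 ≤ x) (hy : 0 ≤ y) : 0 ≤ Int.xor x y := by
  obtain ⟨m, rfl⟩ := Int.eq_ofNat_of_zero_le hx
  obtain ⟨n, rfl⟩ := Int.eq_ofNat_of_zero_le hy
  exact Int.natCast_nonneg _

theorem int_land_nonneg_left {x : Int} (hx : 0 ≤ x) (y : Int) : 0 ≤ Int.land x y := by
  obtain ⟨m, rfl⟩ := Int.eq_ofNat_of_zero_le hx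
  rcases y with n | n
  · exact Int.natCast_nonneg _
  · exact Int.natCast_nonneg _

theorem int_land_mask_nonneg (x : Int) : 0 ≤ Int.land x 4294967295 :=
  int_land_natCast_nonneg x 4294967295

theorem int_eq_of_testBit_eq {a b : Int} (ha : 0 ≤ a) (hb : 0 ≤ b)
    (h : ∀ j, a.testBit j = b.testBit j) : a = b := by
  obtain ⟨m, rfl⟩ := Int.eq_ofNat_of_zero_le ha
  obtain ⟨n, rfl⟩ := Int.eq_ofNat_of_zero_le hb
  exact congrArg _ (Nat.eq_of_testBit_eq h)

theorem int_testBit_natCast (m : Nat) (j : Nat) : Int.testBit (m : Int) j = m.testBit j := rfl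

theorem mask_testBit (j : Nat) : Int.testBit 4294967295 j = decide (j < 32) := by
  show Nat.testBit 4294967295 j = decide (j < 32)
  rw [show (4294967295 : Nat) = 2 ^ 32 - 1 from rfl, Nat.testBit_two_pow_sub_one]

-- the three per-bit agreement facts, by Boolean case analysis
theorem op0_cond (p q r : Bool) :
    Int.lor (Int.land (cond p 1 0) (cond q 1 0)) (Int.land (Int.xor (cond p 1 0) 1) (cond r 1 0))
      = cond ((p && q) || (!p && r)) 1 0 := by
  cases p <;> cases q <;> cases r <;> rfl

theorem op1_cond (p q r : Bool) :
    Int.xor (Int.xor (cond p 1 0) (cond q 1 0)) (cond r 1 0) = cond (xor (xor p q) r) 1 0 := by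
  cases p <;> cases q <;> cases r <;> rfl

theorem op2_cond (p q r : Bool) :
    Int.lor (Int.lor (Int.land (cond p 1 0) (cond q 1 0)) (Int.land (cond p 1 0) (cond r 1 0)))
        (Int.land (cond q 1 0) (cond r 1 0))
      = cond ((p && q) || (p && r) || (q && r)) 1 0 := by
  cases p <;> cases q <;> cases r <;> rfl

-- per-t equalities
theorem case0 (b c d : Int) : f 0 b c d = f_alt 0 b c d := by
  simp only [f, Int.reduceEq, reduceIte]
  rw [buildA (fun x y z => Int.lor (Int.land x y) (Int.land (Int.xor x 1) z)) _ op0_cond b c d]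
  show _ = Int.lor (Int.land (Int.land b 4294967295) (Int.land c 4294967295))
    (Int.land (Int.land (Int.lnot (Int.land b 4294967295)) 4294967295) (Int.land d 4294967295))
  apply int_eq_of_testBit_eq (Int.natCast_nonneg _)
  · exact int_lor_nonneg
      (int_land_nonneg_left (int_land_mask_nonneg b) _)
      (int_land_nonneg_left (int_land_mask_nonneg (Int.lnot (Int.land b 4294967295))) _)
  · intro j
    rw [int_testBit_natCast, nval_testBit]
    simp only [Int.testBit_lor, Int.testBit_land, Int.testBit_lnot, mask_testBit]
    by_cases hj : j < 32 <;>
      cases b.testBit j <;> cases c.testBit j <;> cases d.testBit j <;> simp [hj]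

theorem case13 (t : Int) (ht : t = 1 ∨ t = 3) (b c d : Int) : f t b c d = f_alt t b c d := by
  have hne0 : ¬ t = 0 := by rcases ht with h | h <;> omega
  have hbody : f t b c d = list2int ((PySem.List.pyRange 0 32).foldl (fun res i =>
      res ++ [Int.xor (Int.xor (PySem.List.pyGetD (int2list b 32) i 0)
        (PySem.List.pyGetD (int2list c 32) i 0)) (PySem.List.pyGetD (int2list d 32) i 0)]) []) 32 := by
    rcases ht with h | h <;> subst h <;> rfl
  have halt : f_alt t b c d = Int.xor (Int.xor (Int.land b 4294967295) (Int.land c 4294967295))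
      (Int.land d 4294967295) := by
    rcases ht with h | h <;> subst h <;> rfl
  rw [hbody, halt, buildA (fun x y z => Int.xor (Int.xor x y) z) _ op1_cond b c d]
  apply int_eq_of_testBit_eq (Int.natCast_nonneg _)
  · exact int_xor_nonneg
      (int_xor_nonneg (int_land_mask_nonneg b) (int_land_mask_nonneg c))
      (int_land_mask_nonneg d)
  · intro j
    rw [int_testBit_natCast, nval_testBit]
    simp only [Int.testBit_lxor, Int.testBit_land, mask_testBit]
    by_cases hj : j < 32 <;>
      cases b.testBit j <;> cases c.testBit j <;> cases d.testBit j <;> simp [hj]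

theorem case2 (b c d : Int) : f 2 b c d = f_alt 2 b c d := by
  simp only [f, Int.reduceEq, reduceIte]
  rw [buildA (fun x y z => Int.lor (Int.lor (Int.land x y) (Int.land x z)) (Int.land y z)) _ op2_cond b c d]
  show _ = Int.lor (Int.lor (Int.land (Int.land b 4294967295) (Int.land c 4294967295))
      (Int.land (Int.land b 4294967295) (Int.land d 4294967295)))
      (Int.land (Int.land c 4294967295) (Int.land d 4294967295))
  apply int_eq_of_testBit_eq (Int.natCast_nonneg _)
  · exact int_lor_nonneg
      (int_lor_nonneg (int_land_nonneg_left (int_land_mask_nonneg b) _)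
        (int_land_nonneg_left (int_land_mask_nonneg b) _))
      (int_land_nonneg_left (int_land_mask_nonneg c) _)
  · intro j
    rw [int_testBit_natCast, nval_testBit]
    simp only [Int.testBit_lor, Int.testBit_land, mask_testBit]
    by_cases hj : j < 32 <;>
      cases b.testBit j <;> cases c.testBit j <;> cases d.testBit j <;> simp [hj]

-- ===== VERDICT (by name: the statement is the Claim_ definition above) =====
theorem f_spec : Claim_equal_f := by
  intro t b c d _ hpre
  unfold Spec_f
  rcases hpre with h | h | h | h
  · subst h; exact case0 b c d
  · subst h; exact case13 1 (Or.inl rfl) b c d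
  · subst h; exact case2 b c d
  · subst h; exact case13 3 (Or.inr rfl) b c d
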